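-- pv_equiv track=rewrite | github.com/OleVikLysne/competitive-programming | Kattis/typo/typo.py | hash_typos
-- ===== SOURCE A (Python) =====
-- B = 10**18+7 # largest prime less than 2**32
--
-- A = 31 # cool prime number
--
-- def hash_typos(string, hashed_str):
--     k = len(string)-1
--     typo_hash = ( hashed_str - string[0] * pow(A, k, B) ) % B
--     yield typo_hash
--     for i in range(1, len(string)):
--         typo_hash -= (string[i] * pow(A, k-i, B)) % B
--         typo_hash += (string[i-1] * pow(A, k-i, B)) % B
--         typo_hash %= B
--         yield typo_hash
-- ===== SOURCE B (Python) =====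
-- B = 10**18+7 # largest prime less than 2**32
--
-- A = 31 # cool prime number
--
-- def hash_typos(string, hashed_str):
--     # Closed form per index from precomputed prefix hashes and a power table:
--     # out[i] = (hashed_str + (pre[i] - pre[i+1]) * A^(n-1-i)) % B, no rolling accumulator.
--     n = len(string)
--     pw = [1]
--     for _ in range(n - 1):
--         pw.append(pw[-1] * A % B)
--     pre = [0]
--     for c in string:
--         pre.append((pre[-1] * A + c) % B)
--     for i in range(n):
--         yield (hashed_str + (pre[i] - pre[i + 1]) * pw[n - 1 - i]) % B
-- ===== Notes on version B (the rewrite author's own statement) =====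
-- stated objective: faster
-- what changed: B abandons A's rolling accumulator entirely: it precomputes prefix hashes pre[] and a power table pw[] in two independent passes and emits each output by the closed form (hashed_str + (pre[i]-pre[i+1])*A^(n-1-i)) % B, instead of A's sequential update that subtracts and adds two pow(A,k-i,B) modular exponentiations per step.
import Mathlib
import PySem

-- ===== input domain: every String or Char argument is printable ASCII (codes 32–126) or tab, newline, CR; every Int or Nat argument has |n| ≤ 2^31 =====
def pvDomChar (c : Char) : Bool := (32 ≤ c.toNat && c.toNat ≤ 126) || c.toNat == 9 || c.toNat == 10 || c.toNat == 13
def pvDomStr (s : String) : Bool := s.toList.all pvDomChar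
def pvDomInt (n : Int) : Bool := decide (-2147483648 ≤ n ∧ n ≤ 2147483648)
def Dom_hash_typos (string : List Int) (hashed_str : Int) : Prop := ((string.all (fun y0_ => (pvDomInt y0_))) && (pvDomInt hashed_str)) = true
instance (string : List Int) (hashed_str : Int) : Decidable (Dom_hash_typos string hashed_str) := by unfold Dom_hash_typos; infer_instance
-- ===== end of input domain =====

-- B drops A's rolling accumulator: it precomputes prefix hashes and a power table in two
-- passes and emits each output independently by the closed form
-- out[i] = (hashed_str + (pre[i] - pre[i+1]) * A^(n-1-i)) % B: objective "faster"
-- (no per-step modular exponentiation pow(A, k-i, B)).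


-- B = 10**18+7, A = 31 (module constants of Source A / Source B)
def modB : Int := 10 ^ 18 + 7
def primeA : Int := 31

-- ===== PORT A =====
-- pow(A, e, B): Python three-argument pow = PySem.Int.powMod; the exponents k and k-i
-- are ≥ 0 on Pre_ (nonempty string), so .toNat is exact there.
def hash_typos (string : List Int) (hashed_str : Int) : List Int :=
  let k : Int := (string.length : Int) - 1
  let t0 : Int := PySem.Int.mod (hashed_str - PySem.List.pyGetD string 0 0 * PySem.Int.powMod primeA k.toNat modB) modB
  ((PySem.List.pyRange 1 (string.length : Int) 1).foldl
    (fun (st : Int × List Int) i =>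
      let t1 := st.1 - PySem.Int.mod (PySem.List.pyGetD string i 0 * PySem.Int.powMod primeA (k - i).toNat modB) modB
      let t2 := t1 + PySem.Int.mod (PySem.List.pyGetD string (i - 1) 0 * PySem.Int.powMod primeA (k - i).toNat modB) modB
      let t3 := PySem.Int.mod t2 modB
      (t3, st.2 ++ [t3]))
    (t0, [t0])).2

-- ===== PORT B =====
-- pw = [1]; for _ in range(n-1): pw.append(pw[-1] * A % B)
def pwT (n : Nat) : List Int :=
  (List.range (n - 1)).foldl (fun l _ => l ++ [PySem.Int.mod (l.getLast?.getD 1 * primeA) modB]) [1]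

-- pre = [0]; for c in string: pre.append((pre[-1] * A + c) % B)
def preT (s : List Int) : List Int :=
  s.foldl (fun l c => l ++ [PySem.Int.mod (l.getLast?.getD 0 * primeA + c) modB]) [0]

def hash_typos_alt (string : List Int) (hashed_str : Int) : List Int :=
  let n : Nat := string.length
  let pw : List Int := pwT n
  let pre : List Int := preT string
  (List.range n).map (fun i =>
    PySem.Int.mod (hashed_str + (pre.getD i 0 - pre.getD (i + 1) 0) * pw.getD (n - 1 - i) 0) modB)

-- ===== PRECONDITION & SPEC =====
-- A raises IndexError (string[0]) on the empty list; both ports are claimed only off it.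
def Pre_hash_typos (string : List Int) (hashed_str : Int) : Prop := string ≠ []
instance (string : List Int) (hashed_str : Int) : Decidable (Pre_hash_typos string hashed_str) := by unfold Pre_hash_typos; infer_instance
def pvWitness_hash_typos : List Int × Int := ([3, 5], 7)


def Spec_hash_typos (string : List Int) (hashed_str : Int) (out : List Int) : Prop := out = hash_typos_alt string hashed_str
instance (string : List Int) (hashed_str : Int) (out : List Int) : Decidable (Spec_hash_typos string hashed_str out) := by unfold Spec_hash_typos; infer_instance

-- ===== CLAIM (what is proved, stated in full; the proofs are below) =====
def Claim_equal_hash_typos : Prop := ∀ (string : List Int) (hashed_str : Int), Dom_hash_typos string hashed_str → Pre_hash_typos string hashed_str → Spec_hash_typos string hashed_str (hash_typos string hashed_str)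

-- ===== LEMMAS AND PROOFS =====

theorem modB_pos : (0:Int) < modB := by decide

-- Python % with the positive modulus B is Int.emod
theorem pymod_eq (a : Int) : PySem.Int.mod a modB = a % modB := PySem.Int.mod_eq_emod_of_pos modB_pos

-- the unreduced polynomial prefix hash of the first m characters
def polyPre (s : List Int) (m : Nat) : Int := (s.take m).foldl (fun h c => h * primeA + c) 0

-- the closed form both programs compute at index i
def cf (s : List Int) (H : Int) (i : Nat) : Int :=
  (H + (polyPre s i - polyPre s (i + 1)) * (primeA ^ (s.length - 1 - i) % modB)) % modB

-- B's power table is pointwise A^j % B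
theorem pwT_eq (n : Nat) : pwT n = (List.range ((n - 1) + 1)).map (fun j => primeA ^ j % modB) := by
  unfold pwT
  generalize (n - 1) = kn
  induction kn with
  | zero => simp [modB]
  | succ m ih =>
    rw [List.range_succ, List.foldl_append, ih, List.range_succ (n := m + 1)]
    simp only [List.foldl_cons, List.foldl_nil, List.map_append, List.map_cons, List.map_nil]
    congr 1
    have hlast : ((List.range (m + 1)).map (fun j => primeA ^ j % modB)).getLast?.getD 1 = primeA ^ m % modB := by
      rw [List.getLast?_eq_getElem?]; simp
    rw [hlast, pymod_eq, Int.mul_emod, Int.emod_emod_of_dvd _ (dvd_refl _), ← Int.mul_emod, pow_succ]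

theorem pwT_getD (n j : Nat) (h : j ≤ n - 1) : (pwT n).getD j 0 = primeA ^ j % modB := by
  rw [pwT_eq, List.getD_eq_getElem?_getD, List.getElem?_map]
  simp [List.getElem?_range (by omega : j < (n - 1) + 1)]

theorem polyPre_succ (s : List Int) (m : Nat) (h : m < s.length) :
    polyPre s (m + 1) = polyPre s m * primeA + s.getD m 0 := by
  unfold polyPre
  rw [List.take_add_one, List.foldl_append]
  rw [List.getElem?_eq_getElem h]
  simp [List.getD_eq_getElem?_getD, List.getElem?_eq_getElem h]

theorem preT_eq (s : List Int) : preT s = (List.range (s.length + 1)).map (fun m => polyPre s m % modB) := by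
  induction s using List.reverseRecOn with
  | nil => simp [preT, polyPre, modB]
  | append_singleton s c ih =>
    unfold preT at ih ⊢
    rw [List.foldl_append, ih]
    simp only [List.foldl_cons, List.foldl_nil, List.length_append, List.length_cons,
      List.length_nil, Nat.zero_add]
    rw [List.range_succ (n := s.length + 1), List.map_append]
    have htake : ∀ m ≤ s.length, polyPre (s ++ [c]) m = polyPre s m := by
      intro m hm
      unfold polyPre
      rw [List.take_append_of_le_length hm]
    congr 1
    · apply List.map_congr_left
      intro m hm
      rw [htake m (by simpa using List.mem_range.mp hm)]
    · have hlast : ((List.range (s.length + 1)).map (fun m => polyPre s m % modB)).getLast?.getD 0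
          = polyPre s s.length % modB := by
        rw [List.getLast?_eq_getElem?]; simp
      have hfull : polyPre (s ++ [c]) (s.length + 1) = polyPre s s.length * primeA + c := by
        unfold polyPre
        rw [List.take_of_length_le (by simp), List.foldl_append, List.take_of_length_le (by omega)]
        rfl
      simp only [List.map_cons, List.map_nil, hlast, pymod_eq, hfull]
      rw [Int.add_emod, Int.mul_emod, Int.emod_emod_of_dvd _ (dvd_refl _), ← Int.mul_emod, ← Int.add_emod]

theorem cf_step (s : List Int) (H : Int) (m : Nat) (h : m + 1 ≤ s.length - 1) :
    (cf s H m + (s.getD m 0 - s.getD (m + 1) 0) * (primeA ^ (s.length - 1 - (m + 1)) % modB)) % modB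
      = cf s H (m + 1) := by
  have hlen : m + 2 ≤ s.length := by omega
  set e : Nat := s.length - 1 - (m + 1) with he
  have he1 : s.length - 1 - m = e + 1 := by omega
  have hp1 : polyPre s (m + 1) = polyPre s m * primeA + s.getD m 0 :=
    polyPre_succ s m (by omega)
  have hp2 : polyPre s (m + 2) = polyPre s (m + 1) * primeA + s.getD (m + 1) 0 :=
    polyPre_succ s (m + 1) (by omega)
  unfold cf
  rw [he1]
  have hm1 : Int.ModEq modB (primeA ^ (e + 1) % modB) (primeA ^ (e + 1)) :=
    Int.emod_emod_of_dvd _ dvd_rfl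
  have hm2 : Int.ModEq modB (primeA ^ e) (primeA ^ e % modB) :=
    (Int.emod_emod_of_dvd _ dvd_rfl).symm
  calc ((H + (polyPre s m - polyPre s (m + 1)) * (primeA ^ (e + 1) % modB)) % modB
          + (s.getD m 0 - s.getD (m + 1) 0) * (primeA ^ e % modB)) % modB
      = ((H + (polyPre s m - polyPre s (m + 1)) * (primeA ^ (e + 1) % modB))
          + (s.getD m 0 - s.getD (m + 1) 0) * (primeA ^ e % modB)) % modB := by
        rw [Int.emod_add_emod]
    _ = (H + (polyPre s (m + 1) - polyPre s (m + 1 + 1)) * (primeA ^ e % modB)) % modB := by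
        apply Int.ModEq.eq  -- ModEq n a b is a % n = b % n
        calc H + (polyPre s m - polyPre s (m + 1)) * (primeA ^ (e + 1) % modB)
                + (s.getD m 0 - s.getD (m + 1) 0) * (primeA ^ e % modB)
            ≡ H + (polyPre s m - polyPre s (m + 1)) * primeA ^ (e + 1)
                + (s.getD m 0 - s.getD (m + 1) 0) * primeA ^ e [ZMOD modB] :=
              Int.ModEq.add (Int.ModEq.add_left H (Int.ModEq.mul_left _ hm1))
                (Int.ModEq.mul_left _ hm2.symm)
          _ = H + (polyPre s (m + 1) - polyPre s (m + 1 + 1)) * primeA ^ e := by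
              rw [show m + 1 + 1 = m + 2 from rfl, hp2, hp1, pow_succ]; ring
          _ ≡ H + (polyPre s (m + 1) - polyPre s (m + 1 + 1)) * (primeA ^ e % modB) [ZMOD modB] :=
              Int.ModEq.add_left H (Int.ModEq.mul_left _ hm2)
theorem mod_step (a x y : Int) :
    (a - x % modB + y % modB) % modB = (a + (y - x)) % modB := by
  have hx : x % modB = x - modB * (x / modB) := by rw [Int.emod_def]
  have hy : y % modB = y - modB * (y / modB) := by rw [Int.emod_def]
  have h : a - x % modB + y % modB = (a + (y - x)) + modB * (x / modB - y / modB) := by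
    rw [hx, hy]; ring
  rw [h, Int.add_mul_emod_self_left]

theorem A_fold_inv (s : List Int) (H : Int) (m : Nat) (hm : m ≤ s.length - 1) :
    ((List.map (fun k : Nat => (1 : Int) + (k : Int)) (List.range m)).foldl
      (fun (st : Int × List Int) i =>
        let t1 := st.1 - PySem.Int.mod (PySem.List.pyGetD s i 0 * PySem.Int.powMod primeA (((s.length : Int) - 1) - i).toNat modB) modB
        let t2 := t1 + PySem.Int.mod (PySem.List.pyGetD s (i - 1) 0 * PySem.Int.powMod primeA (((s.length : Int) - 1) - i).toNat modB) modB
        let t3 := PySem.Int.mod t2 modB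
        (t3, st.2 ++ [t3]))
      (cf s H 0, [cf s H 0]))
      = (cf s H m, (List.range (m + 1)).map (cf s H)) := by
  induction m with
  | zero => simp
  | succ m ih =>
    rw [List.range_succ, List.map_append, List.foldl_append, ih (by omega)]
    simp only [List.map_cons, List.map_nil, List.foldl_cons, List.foldl_nil]
    have hg1 : PySem.List.pyGetD s (1 + (m : Int)) 0 = s.getD (m + 1) 0 := by
      rw [show (1 + (m : Int)) = ((m + 1 : Nat) : Int) by push_cast; ring, PySem.List.pyGetD_natCast]
    have hg0 : PySem.List.pyGetD s (1 + (m : Int) - 1) 0 = s.getD m 0 := by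
      rw [show (1 + (m : Int) - 1) = ((m : Nat) : Int) by omega, PySem.List.pyGetD_natCast]
    have hexp : (((s.length : Int) - 1) - (1 + (m : Int))).toNat = s.length - 1 - (m + 1) := by omega
    simp only [hg1, hg0, hexp, PySem.Int.powMod, pymod_eq]
    have hstep := mod_step (cf s H m)
      (s.getD (m + 1) 0 * (primeA ^ (s.length - 1 - (m + 1)) % modB))
      (s.getD m 0 * (primeA ^ (s.length - 1 - (m + 1)) % modB))
    rw [hstep, show s.getD m 0 * (primeA ^ (s.length - 1 - (m + 1)) % modB)
        - s.getD (m + 1) 0 * (primeA ^ (s.length - 1 - (m + 1)) % modB)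
        = (s.getD m 0 - s.getD (m + 1) 0) * (primeA ^ (s.length - 1 - (m + 1)) % modB) by ring,
      cf_step s H m hm]
    rw [show List.range (m + 1 + 1) = List.range (m + 1) ++ [m + 1] from List.range_succ, List.map_append]
    simp


theorem preT_getD (s : List Int) (m : Nat) (h : m ≤ s.length) : (preT s).getD m 0 = polyPre s m % modB := by
  rw [preT_eq, List.getD_eq_getElem?_getD, List.getElem?_map]
  simp [List.getElem?_range (by omega : m < s.length + 1)]

-- each element B emits is the closed form cf
theorem B_elem (s : List Int) (H : Int) (i : Nat) (hi : i < s.length) :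
    PySem.Int.mod (H + ((preT s).getD i 0 - (preT s).getD (i + 1) 0) * (pwT s.length).getD (s.length - 1 - i) 0) modB
      = cf s H i := by
  rw [pymod_eq, preT_getD s i (by omega), preT_getD s (i + 1) (by omega),
    pwT_getD s.length (s.length - 1 - i) (by omega)]
  unfold cf
  have h1 : Int.ModEq modB (polyPre s i % modB) (polyPre s i) := Int.emod_emod_of_dvd _ dvd_rfl
  have h2 : Int.ModEq modB (polyPre s (i + 1) % modB) (polyPre s (i + 1)) := Int.emod_emod_of_dvd _ dvd_rfl
  exact Int.ModEq.eq (Int.ModEq.add_left H (Int.ModEq.mul_right _ (h1.sub h2)))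

-- A's first value is cf 0
theorem t0_eq (s : List Int) (H : Int) (hn : 1 ≤ s.length) :
    PySem.Int.mod (H - PySem.List.pyGetD s 0 0 * PySem.Int.powMod primeA ((s.length : Int) - 1).toNat modB) modB
      = cf s H 0 := by
  have hg : PySem.List.pyGetD s 0 0 = s.getD 0 0 := by
    rw [show (0 : Int) = ((0 : Nat) : Int) from rfl, PySem.List.pyGetD_natCast]
  have ht : ((s.length : Int) - 1).toNat = s.length - 1 := by omega
  have h0 : polyPre s 0 = 0 := rfl
  rw [hg, ht, PySem.Int.powMod, pymod_eq, pymod_eq]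
  unfold cf
  rw [show (0 : Nat) + 1 = 1 from rfl, polyPre_succ s 0 hn, h0]
  rw [show s.length - 1 - 0 = s.length - 1 from rfl]
  congr 1
  ring

-- ===== VERDICT (by name: the statement is the Claim_ definition above) =====
theorem hash_typos_spec : Claim_equal_hash_typos := by
  intro s H _hdom hpre
  unfold Spec_hash_typos hash_typos hash_typos_alt
  have hn : 1 ≤ s.length := List.length_pos_of_ne_nil hpre
  simp only []
  rw [t0_eq s H hn, PySem.List.pyRange_one]
  rw [show ((s.length : Int) - 1).toNat = s.length - 1 by omega]
  rw [A_fold_inv s H (s.length - 1) le_rfl]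
  rw [Nat.sub_add_cancel hn]
  symm
  apply List.map_congr_left
  intro i hi
  exact B_elem s H i (List.mem_range.mp hi)
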